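-- pv_equiv track=rewrite | github.com/taromukhalela-alt/Vector-AI | app.py | extract_last_offer
-- ===== SOURCE A (Python) =====
-- def extract_last_offer(history):
--     """Find the last assistant message that contained an offer/question."""
--     for msg in reversed(history or []):
--         if msg.get("role") != "assistant":
--             continue
--         content = msg.get("content", "")
--         if "?" not in content:
--             continue
--         sentences = content.split(".")
--         for sentence in reversed(sentences):
--             if "?" in sentence:
--                 return sentence.strip()
--     return "Give a worked explanation and example relevant to the current topic."
-- ===== SOURCE B (Python) =====
-- _DEFAULT = "Give a worked explanation and example relevant to the current topic."
--
-- def extract_last_offer(history):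
--     """Forward single-pass: keep overwriting the latest question sentence seen."""
--     result = None
--     for msg in (history or []):
--         if msg.get("role") == "assistant":
--             content = msg.get("content", "")
--             if "?" in content:
--                 for sentence in content.split("."):
--                     if "?" in sentence:
--                         result = sentence.strip()
--     return _DEFAULT if result is None else result
-- ===== Notes on version B (the rewrite author's own statement) =====
-- stated objective: simpler
-- what changed: Replaces A's reversed outer scan with early return and reversed inner sentence scan by a single forward pass over history that keeps overwriting the latest matching question sentence and returns the survivor (or the default).
import Mathlib
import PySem

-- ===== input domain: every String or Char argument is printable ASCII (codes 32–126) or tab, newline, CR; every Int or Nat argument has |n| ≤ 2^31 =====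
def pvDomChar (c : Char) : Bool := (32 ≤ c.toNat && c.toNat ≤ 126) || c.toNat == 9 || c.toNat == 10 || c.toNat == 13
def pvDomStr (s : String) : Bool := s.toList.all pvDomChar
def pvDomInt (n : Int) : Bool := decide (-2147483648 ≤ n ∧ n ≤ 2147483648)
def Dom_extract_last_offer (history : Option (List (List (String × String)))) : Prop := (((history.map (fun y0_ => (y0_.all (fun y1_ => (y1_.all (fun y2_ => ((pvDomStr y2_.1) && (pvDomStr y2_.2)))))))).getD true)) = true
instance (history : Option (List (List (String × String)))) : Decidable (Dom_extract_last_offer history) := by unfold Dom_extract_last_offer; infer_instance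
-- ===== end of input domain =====

-- B replaces A's reversed scan with early return by a single forward pass that keeps
-- overwriting the latest question sentence (objective: simpler decomposition; same cost).

def pvDefaultOffer : String := "Give a worked explanation and example relevant to the current topic."

-- ===== PORT A =====
-- A's outer loop 'for msg in reversed(history or [])' with early return;
-- the inner 'for sentence in reversed(sentences): if "?" in sentence: return …'
-- is the first match of the reversed sentence list (List.find?).
def extractLoopA : List (List (String × String)) → String
  | [] => pvDefaultOffer
  | msg :: rest =>
    if PySem.Dict.get? (PySem.Dict.mk msg) "role" ≠ some "assistant" then extractLoopA rest
    else
      let content := PySem.Dict.getD (PySem.Dict.mk msg) "content" ""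
      if PySem.Str.isIn "?" content = false then extractLoopA rest
      else
        -- content.split("."): sep "." ≠ "", so split? is always some; getD [] is never hit
        match (((PySem.Str.split? content ".").getD []).reverse.find?
                (fun s => PySem.Str.isIn "?" s)) with
        | some s => PySem.Str.strip s
        | none => extractLoopA rest

def extract_last_offer (history : Option (List (List (String × String)))) : String :=
  extractLoopA ((history.getD []).reverse)

-- ===== PORT B =====
def stepB (acc : Option String) (msg : List (String × String)) : Option String :=
  if PySem.Dict.get? (PySem.Dict.mk msg) "role" = some "assistant" then
    let content := PySem.Dict.getD (PySem.Dict.mk msg) "content" ""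
    if PySem.Str.isIn "?" content then
      ((PySem.Str.split? content ".").getD []).foldl
        (fun a s => if PySem.Str.isIn "?" s then some (PySem.Str.strip s) else a) acc
    else acc
  else acc

def extract_last_offer_alt (history : Option (List (List (String × String)))) : String :=
  match (history.getD []).foldl stepB none with
  | some s => s
  | none => pvDefaultOffer

-- ===== PRECONDITION & SPEC =====
def Spec_extract_last_offer (history : Option (List (List (String × String)))) (out : String) : Prop := out = extract_last_offer_alt history
instance (history : Option (List (List (String × String)))) (out : String) : Decidable (Spec_extract_last_offer history out) := by unfold Spec_extract_last_offer; infer_instance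

-- ===== CLAIM (what is proved, stated in full; the proofs are below) =====
def Claim_equal_extract_last_offer : Prop := ∀ (history : Option (List (List (String × String)))), Dom_extract_last_offer history → Spec_extract_last_offer history (extract_last_offer history)

-- ===== LEMMAS AND PROOFS =====

-- A's "value contributed by one message", factored out for the proof.
def gMsg (msg : List (String × String)) : Option String :=
  if PySem.Dict.get? (PySem.Dict.mk msg) "role" = some "assistant" then
    if PySem.Str.isIn "?" (PySem.Dict.getD (PySem.Dict.mk msg) "content" "") then
      ((((PySem.Str.split? (PySem.Dict.getD (PySem.Dict.mk msg) "content" "") ".").getD []).reverse.find?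
          (fun s => PySem.Str.isIn "?" s)).map PySem.Str.strip)
    else none
  else none

-- a last-match forward fold is the first match of the reversed list
theorem foldl_lastMatch (P : String → Bool) (f : String → String) :
    ∀ (ss : List String) (acc : Option String),
      ss.foldl (fun a s => if P s then some (f s) else a) acc =
        match (ss.reverse.find? P).map f with
        | some v => some v
        | none => acc := by
  intro ss
  induction ss with
  | nil => intro acc; rfl
  | cons x t ih =>
    intro acc
    simp only [List.foldl_cons, List.reverse_cons, List.find?_append]
    rw [ih]
    cases h : t.reverse.find? P with
    | some v => simp [h, Option.or]
    | none =>
      simp only [h, Option.none_or]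
      by_cases hx : P x = true
      · simp [hx, List.find?]
      · simp [hx, List.find?]

theorem stepB_eq (acc : Option String) (msg : List (String × String)) :
    stepB acc msg = match gMsg msg with | some v => some v | none => acc := by
  unfold stepB gMsg
  by_cases h1 : PySem.Dict.get? (PySem.Dict.mk msg) "role" = some "assistant"
  · rw [if_pos h1, if_pos h1]
    by_cases h2 : PySem.Str.isIn "?" (PySem.Dict.getD (PySem.Dict.mk msg) "content" "") = true
    · rw [if_pos h2, if_pos h2, foldl_lastMatch]
    · rw [if_neg h2, if_neg h2]
  · rw [if_neg h1, if_neg h1]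

theorem extractLoopA_cons (m : List (String × String)) (rest : List (List (String × String))) :
    extractLoopA (m :: rest) =
      match gMsg m with | some v => v | none => extractLoopA rest := by
  conv_lhs => rw [extractLoopA]
  unfold gMsg
  by_cases h1 : PySem.Dict.get? (PySem.Dict.mk m) "role" = some "assistant"
  · rw [if_neg (by simp [h1]), if_pos h1]
    by_cases h2 : PySem.Str.isIn "?" (PySem.Dict.getD (PySem.Dict.mk m) "content" "") = true
    · rw [if_neg (by rw [h2]; decide), if_pos h2]
      cases hf : ((PySem.Str.split? (PySem.Dict.getD (PySem.Dict.mk m) "content" "") ".").getD []).reverse.find?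
          (fun s => PySem.Str.isIn "?" s) with
      | some s => rfl
      | none => rfl
    · rw [if_pos (eq_false_of_ne_true h2), if_neg h2]
  · rw [if_pos h1, if_neg h1]

theorem loopA_eq_fold :
    ∀ (rl : List (List (String × String))),
      extractLoopA rl =
        match rl.reverse.foldl stepB none with | some v => v | none => pvDefaultOffer := by
  intro rl
  induction rl with
  | nil => rfl
  | cons m t ih =>
    rw [extractLoopA_cons, ih]
    simp only [List.reverse_cons, List.foldl_append, List.foldl_cons, List.foldl_nil]
    rw [stepB_eq]
    cases gMsg m <;> rfl

-- ===== VERDICT (by name: the statement is the Claim_ definition above) =====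
theorem extract_last_offer_spec : Claim_equal_extract_last_offer := by
  intro history _
  unfold Spec_extract_last_offer extract_last_offer extract_last_offer_alt
  rw [loopA_eq_fold]
  simp only [List.reverse_reverse]
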